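-- pv_equiv track=rewrite | github.com/YuseqYaseq/University-Projects | ADPTO/lab1/brute_force.py | select_set_vertices
-- ===== SOURCE A (Python) =====
-- def select_set_vertices(i, k):
--     count = 0
--     solution = []
--     d = 0
--     while i > 0:
--         if i % 2 == 1:
--             count += 1
--             solution.append(d)
--         i //= 2
--         d += 1
--     if count == k:
--         return solution
--     else:
--         return []
-- ===== SOURCE B (Python) =====
-- def select_set_vertices(i, k):
--     solution = []
--     while i > 0:
--         j = i & (i - 1)                      # clear the lowest set bit
--         solution.append((i - j).bit_length() - 1)
--         i = j
--     return solution if len(solution) == k else []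
-- ===== Notes on version B (the rewrite author's own statement) =====
-- stated objective: alternative
-- what changed: Replaces the per-bit halving scan with Brian-Kernighan iteration over set bits only (i & (i-1) clears the lowest set bit, whose position is read off with bit_length), and drops the separate count variable in favour of len(solution).
import Mathlib
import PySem

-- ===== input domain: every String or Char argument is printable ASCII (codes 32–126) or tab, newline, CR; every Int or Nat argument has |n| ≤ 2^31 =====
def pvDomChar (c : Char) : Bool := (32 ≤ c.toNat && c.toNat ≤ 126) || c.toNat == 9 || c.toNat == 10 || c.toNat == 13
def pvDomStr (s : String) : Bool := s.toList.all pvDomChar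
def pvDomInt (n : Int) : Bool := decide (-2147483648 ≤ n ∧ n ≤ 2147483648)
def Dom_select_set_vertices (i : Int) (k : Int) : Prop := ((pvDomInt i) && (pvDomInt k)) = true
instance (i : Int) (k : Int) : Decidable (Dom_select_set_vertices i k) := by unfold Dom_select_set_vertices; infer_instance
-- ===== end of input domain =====

-- B replaces A's per-bit halving scan with Brian–Kernighan iteration over the set
-- bits only (i & (i-1) clears the lowest set bit); same return value, alternative algorithm.


-- ===== PORT A =====
-- A's `while i > 0` loop runs only for positive i, so the loop state is carried as
-- i.toNat : Nat (exact: for i > 0, Python's `i // 2` on a positive int is Nat division;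
-- for i ≤ 0 the loop body never runs in Python and toNat = 0 skips it here too).
def pvALoop (n : Nat) (count : Int) (solution : List Int) (d : Int) : Int × List Int :=
  if _h : n = 0 then (count, solution)
  else if n % 2 = 1 then pvALoop (n / 2) (count + 1) (solution ++ [d]) (d + 1)
  else pvALoop (n / 2) count solution (d + 1)
  termination_by n
  decreasing_by all_goals exact Nat.div_lt_self (Nat.pos_of_ne_zero _h) (by norm_num)

def select_set_vertices (i : Int) (k : Int) : List Int :=
  let r := pvALoop i.toNat 0 [] 0
  if r.1 = k then r.2 else []

-- ===== PORT B =====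
-- B's `while i > 0` loop likewise carries i.toNat (all loop values are ≥ 0);
-- `(i - j).bit_length() - 1` on the positive power of two i - j is exactly Nat.log2.
-- The loop appends one position per iteration, so it is the cons-recursion below.
def pvBLoop (n : Nat) : List Int :=
  if _h : n = 0 then []
  else
    let j := n &&& (n - 1)                  -- clear the lowest set bit
    Int.ofNat (Nat.log2 (n - j)) :: pvBLoop j
  termination_by n
  decreasing_by
    exact Nat.lt_of_le_of_lt Nat.and_le_right (Nat.sub_lt (Nat.pos_of_ne_zero _h) one_pos)

def select_set_vertices_alt (i : Int) (k : Int) : List Int :=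
  let solution := pvBLoop i.toNat
  if (solution.length : Int) = k then solution else []

-- ===== PRECONDITION & SPEC =====
def Spec_select_set_vertices (i : Int) (k : Int) (out : List Int) : Prop := out = select_set_vertices_alt i k
instance (i : Int) (k : Int) (out : List Int) : Decidable (Spec_select_set_vertices i k out) := by unfold Spec_select_set_vertices; infer_instance

-- ===== CLAIM (what is proved, stated in full; the proofs are below) =====
def Claim_equal_select_set_vertices : Prop := ∀ (i : Int) (k : Int), Dom_select_set_vertices i k → Spec_select_set_vertices i k (select_set_vertices i k)

-- ===== LEMMAS AND PROOFS =====

-- Canonical list of set-bit positions of n, offset by d (A's division recursion, head-first).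
def pvBits (n : Nat) (d : Int) : List Int :=
  if n = 0 then []
  else if n % 2 = 1 then d :: pvBits (n / 2) (d + 1)
  else pvBits (n / 2) (d + 1)
  termination_by n
  decreasing_by all_goals exact Nat.div_lt_self (Nat.pos_of_ne_zero (by omega)) (by norm_num)

lemma pvBits_zero (d : Int) : pvBits 0 d = [] := by rw [pvBits]; simp

lemma pvBits_two_mul (m : Nat) (d : Int) : pvBits (2 * m) d = pvBits m (d + 1) := by
  rcases Nat.eq_zero_or_pos m with h | h
  · simp [h, pvBits_zero]
  · rw [pvBits]; simp [Nat.mul_div_cancel_left m (by norm_num : 0 < 2), Nat.mul_mod_right]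
    omega

lemma pvBits_odd (m : Nat) (hm : m % 2 = 1) (d : Int) :
    pvBits m d = d :: pvBits (m / 2) (d + 1) := by
  rw [pvBits]; simp [hm]; omega

-- land lemma 1: for odd n, n &&& (n-1) = n - 1.
lemma land_pred_odd (n : Nat) (h : n % 2 = 1) : n &&& (n - 1) = n - 1 := by
  apply Nat.eq_of_testBit_eq
  intro i
  cases i with
  | zero => simp [Nat.testBit_zero]; omega
  | succ i =>
      rw [Nat.testBit_land, Nat.testBit_succ, Nat.testBit_succ]
      have h2 : (n - 1) / 2 = n / 2 := by omega
      rw [h2, Bool.and_self]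

-- land lemma 2: (2m) &&& (2m - 1) = 2 * (m &&& (m - 1)) for m > 0.
lemma land_pred_two_mul (m : Nat) (h : 0 < m) :
    (2 * m) &&& (2 * m - 1) = 2 * (m &&& (m - 1)) := by
  apply Nat.eq_of_testBit_eq
  intro i
  cases i with
  | zero => simp [Nat.testBit_zero]
  | succ i =>
      rw [Nat.testBit_land, Nat.testBit_succ, Nat.testBit_succ, Nat.testBit_succ]
      have h1 : 2 * m / 2 = m := by omega
      have h2 : (2 * m - 1) / 2 = m - 1 := by omega
      have h3 : 2 * (m &&& (m - 1)) / 2 = m &&& (m - 1) := by omega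
      rw [h1, h2, h3, Nat.testBit_land]

lemma log2_two_mul (x : Nat) (hx : 0 < x) : Nat.log2 (2 * x) = Nat.log2 x + 1 := by
  rw [Nat.log2_eq_log_two, Nat.log2_eq_log_two, mul_comm,
    Nat.log_mul_base (by norm_num) (by omega)]

-- The canonical list satisfies the Brian–Kernighan recursion.
lemma pvBits_kern (m : Nat) (hm : 0 < m) (d : Int) :
    pvBits m d = (d + Int.ofNat (Nat.log2 (m - (m &&& (m - 1))))) :: pvBits (m &&& (m - 1)) d := by
  induction m using Nat.strong_induction_on generalizing d with
  | _ m ih =>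
    rcases Nat.even_or_odd m with ⟨m', hm'⟩ | hodd
    · -- even case, m = 2 * m'
      subst hm'
      have hm' : 0 < m' := by omega
      rw [show m' + m' = 2 * m' by ring] at *
      have hIH := ih m' (by omega) hm' (d + 1)
      rw [pvBits_two_mul, hIH, land_pred_two_mul m' hm']
      have hle : m' &&& (m' - 1) ≤ m' - 1 := Nat.and_le_right
      have hsub : 2 * m' - 2 * (m' &&& (m' - 1)) = 2 * (m' - (m' &&& (m' - 1))) := by omega
      rw [hsub, log2_two_mul _ (by omega), pvBits_two_mul]
      congr 1
      simp only [Int.ofNat_eq_natCast]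
      push_cast
      ring
    · -- odd case
      have h1 : m % 2 = 1 := Nat.odd_iff.mp hodd
      rw [pvBits_odd m h1, land_pred_odd m h1]
      have : m - (m - 1) = 1 := by omega
      rw [this]
      have hm1 : m - 1 = 2 * (m / 2) := by omega
      rw [hm1, pvBits_two_mul]
      norm_num [Nat.log2_eq_log_two]

-- B's loop computes the canonical list.
lemma pvBLoop_eq_bits (n : Nat) : pvBLoop n = pvBits n 0 := by
  induction n using Nat.strong_induction_on with
  | _ n ih =>
    rcases Nat.eq_zero_or_pos n with h | h
    · rw [h, pvBLoop, pvBits_zero]; simp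
    · rw [pvBLoop]
      simp only [Nat.pos_iff_ne_zero.mp h, dite_false]
      rw [pvBits_kern n h 0,
        ih (n &&& (n - 1)) (Nat.lt_of_le_of_lt Nat.and_le_right (Nat.sub_lt h one_pos))]
      simp

-- A's loop: count is the number of positions found, solution the accumulated list.
lemma pvALoop_eq (n : Nat) :
    ∀ (c : Int) (s : List Int) (d : Int),
      pvALoop n c s d = (c + (pvBits n d).length, s ++ pvBits n d) := by
  induction n using Nat.strong_induction_on with
  | _ n ih =>
    intro c s d
    rcases Nat.eq_zero_or_pos n with h | h
    · rw [h, pvALoop, pvBits_zero]; simp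
    · rw [pvALoop]
      simp only [Nat.pos_iff_ne_zero.mp h, dite_false]
      by_cases h2 : n % 2 = 1
      · rw [if_pos h2, ih (n / 2) (Nat.div_lt_self h (by norm_num)),
          pvBits_odd n h2 d]
        simp [List.append_assoc]
        omega
      · rw [if_neg h2, ih (n / 2) (Nat.div_lt_self h (by norm_num))]
        have hm : n = 2 * (n / 2) := by omega
        conv_rhs => rw [hm, pvBits_two_mul]

-- ===== VERDICT (by name: the statement is the Claim_ definition above) =====
theorem select_set_vertices_spec : Claim_equal_select_set_vertices := by
  intro i k _
  unfold Spec_select_set_vertices select_set_vertices select_set_vertices_alt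
  rw [pvALoop_eq, pvBLoop_eq_bits]
  simp
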